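-- pv_equiv track=rewrite | github.com/qianchne/BasicAlgorithmsPython | LeetCode/num3.py | findMaxChild
-- ===== SOURCE A (Python) =====
-- def findMaxChild(myList):
--     if myList != '' :
--         maxNum = 1
--     num = 0
--     childlist = []
--     for i in myList:
--         childlist.append(i)
--         if i in childlist :
--             if num > maxNum:
--                 maxNum = num
--                 num = 0
--                 childlist = []
--         num = num + 1
--     return maxNum
-- ===== SOURCE B (Python) =====
-- def findMaxChild(myList):
--     # A's value depends only on len(myList): it is the largest m >= 1 with
--     # m*(m+1)/2 <= len(myList).  Find it by a short arithmetic search.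
--     n = len(myList)
--     m = 1
--     while (m + 1) * (m + 2) // 2 <= n:
--         m += 1
--     return m
-- ===== Notes on version B (the rewrite author's own statement) =====
-- stated objective: faster
-- what changed: B ignores the list contents (the membership test in A is always true) and computes the result purely from len(myList) as the largest m>=1 with m(m+1)/2 <= n, by a short arithmetic loop.
import Mathlib
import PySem

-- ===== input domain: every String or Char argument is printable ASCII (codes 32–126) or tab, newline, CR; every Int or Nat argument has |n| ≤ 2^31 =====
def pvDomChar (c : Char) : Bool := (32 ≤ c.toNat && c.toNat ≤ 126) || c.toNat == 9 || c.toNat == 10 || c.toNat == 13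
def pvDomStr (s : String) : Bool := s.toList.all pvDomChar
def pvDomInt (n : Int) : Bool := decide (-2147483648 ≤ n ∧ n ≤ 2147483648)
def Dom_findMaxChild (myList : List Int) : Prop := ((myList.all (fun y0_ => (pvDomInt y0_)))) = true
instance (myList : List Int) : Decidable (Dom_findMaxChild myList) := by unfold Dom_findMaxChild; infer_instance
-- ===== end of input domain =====

-- B computes A's value purely from the length (A's membership test is always true),
-- by a short arithmetic search instead of A's stateful scan of the list.
-- ===== PORT A =====
def findMaxChild (myList : List Int) : Int :=
  -- `myList != ''` : in Python 3 a list is never equal to a string, so this is always True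
  let maxNum : Int := 1
  let st := myList.foldl (fun (st : Int × Int × List Int) i =>
    let childlist := st.2.2 ++ [i]
    let (maxNum, num, childlist) :=
      if childlist.contains i then
        if st.2.1 > st.1 then (st.2.1, (0 : Int), ([] : List Int))
        else (st.1, st.2.1, childlist)
      else (st.1, st.2.1, childlist)
    (maxNum, num + 1, childlist)) (maxNum, (0 : Int), ([] : List Int))
  st.1

-- ===== PORT B =====
-- lemma used by the port's own termination proof
theorem pvAltGuard_lt {n m : Int} (h : PySem.Int.floordiv ((m + 1) * (m + 2)) 2 ≤ n) :
    m < n := by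
  rw [PySem.Int.floordiv_eq_ediv_of_pos (by omega)] at h
  have h2 : (m + 1) * (m + 2) ≥ 2 * (m + 1) := by nlinarith [mul_self_nonneg (2 * m + 1)]
  omega

def altLoop (n m : Int) : Int :=
  if PySem.Int.floordiv ((m + 1) * (m + 2)) 2 ≤ n then altLoop n (m + 1) else m
termination_by (n - m).toNat
decreasing_by have := pvAltGuard_lt ‹_›; omega

def findMaxChild_alt (myList : List Int) : Int :=
  altLoop (myList.length : Int) 1

-- ===== PRECONDITION & SPEC =====
def Spec_findMaxChild (myList : List Int) (out : Int) : Prop := out = findMaxChild_alt myList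
instance (myList : List Int) (out : Int) : Decidable (Spec_findMaxChild myList out) := by unfold Spec_findMaxChild; infer_instance

-- ===== CLAIM (what is proved, stated in full; the proofs are below) =====
def Claim_equal_findMaxChild : Prop := ∀ (myList : List Int), Dom_findMaxChild myList → Spec_findMaxChild myList (findMaxChild myList)

-- ===== LEMMAS AND PROOFS =====

-- ===== VERDICT (by name: the statement is the Claim_ definition above) =====
-- proof-side characterisation of A's loop: the childlist is irrelevant
def gA : Nat → Int → Int → Int
  | 0, M, _ => M
  | n + 1, M, k => if k > M then gA n k 1 else gA n M (k + 1)

theorem foldA_eq_gA (l : List Int) : ∀ (M k : Int) (cl : List Int),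
    (l.foldl (fun (st : Int × Int × List Int) i =>
      let childlist := st.2.2 ++ [i]
      let (maxNum, num, childlist) :=
        if childlist.contains i then
          if st.2.1 > st.1 then (st.2.1, (0 : Int), ([] : List Int))
          else (st.1, st.2.1, childlist)
        else (st.1, st.2.1, childlist)
      (maxNum, num + 1, childlist)) (M, k, cl)).1 = gA l.length M k := by
  induction l with
  | nil => intro M k cl; simp [gA]
  | cons i l ih =>
    intro M k cl
    have hc : (cl ++ [i]).contains i = true := by simp
    by_cases h : k > M
    · simp only [List.foldl_cons, hc, if_pos h, List.length_cons, gA, ih]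
      simp [h]
    · simp only [List.foldl_cons, hc, if_neg h, List.length_cons, gA, ih]
      simp [h]

theorem floordiv_succ_step (M : Int) :
    PySem.Int.floordiv ((M + 2) * (M + 3)) 2 =
    PySem.Int.floordiv ((M + 1) * (M + 2)) 2 + (M + 2) := by
  rw [PySem.Int.floordiv_eq_ediv_of_pos (by omega),
      PySem.Int.floordiv_eq_ediv_of_pos (by omega)]
  have : (M + 2) * (M + 3) = (M + 1) * (M + 2) + (M + 2) * 2 := by ring
  rw [this, Int.add_mul_ediv_right _ _ (by omega : (2:Int) ≠ 0)]

theorem gA_eq_altLoop : ∀ (n : Nat) (M k : Int), 1 ≤ M → 0 ≤ k → k ≤ M + 1 →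
    gA n M k = altLoop ((n : Int) + PySem.Int.floordiv ((M + 1) * (M + 2)) 2 - (M + 2) + k) M := by
  intro n
  induction n with
  | zero =>
    intro M k hM hk0 hk1
    rw [altLoop]
    rw [if_neg (by omega)]
    rfl
  | succ n ih =>
    intro M k hM hk0 hk1
    by_cases h : k > M
    · have hkM : k = M + 1 := by omega
      have h1 := ih (M + 1) 1 (by omega) (by omega) (by omega)
      rw [show (M + 1 + 1) * (M + 1 + 2) = (M + 2) * (M + 3) from by ring] at h1
      have hs := floordiv_succ_step M
      show (if k > M then gA n k 1 else gA n M (k + 1)) = _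
      rw [if_pos h, hkM, h1]
      conv_rhs => rw [altLoop]
      rw [if_pos (by push_cast; omega)]
      congr 1
      push_cast
      omega
    · have h1 := ih M (k + 1) hM (by omega) (by omega)
      show (if k > M then gA n k 1 else gA n M (k + 1)) = _
      rw [if_neg h, h1]
      congr 1
      push_cast
      ring

theorem findMaxChild_spec : Claim_equal_findMaxChild := by
  intro myList _
  unfold Spec_findMaxChild findMaxChild findMaxChild_alt
  rw [foldA_eq_gA]
  rw [gA_eq_altLoop myList.length 1 0 (by omega) (by omega) (by omega)]
  rw [show PySem.Int.floordiv (((1:Int) + 1) * (1 + 2)) 2 = 3 from by decide]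
  congr 1
  omega
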